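-- pv_equiv track=rewrite | github.com/Klotzkette/legaltech | src/word_processor.py | compute_number_strings
-- ===== SOURCE A (Python) =====
-- from typing import Dict, List, Optional, Tuple
--
-- def compute_number_strings(headings: Dict[int, int]) -> Dict[int, str]:
--     counters: List[int] = [0] * 10
--     result: Dict[int, str] = {}
--     for idx in sorted(headings.keys()):
--         level = headings[idx]
--         for parent in range(level - 1):
--             if counters[parent] == 0:
--                 counters[parent] = 1
--         counters[level - 1] += 1
--         for deeper in range(level, 10):
--             counters[deeper] = 0
--         parts = [str(counters[i]) for i in range(level)]
--         result[idx] = ".".join(parts) + ("." if level == 1 else "")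
--     return result
-- ===== SOURCE B (Python) =====
-- def compute_number_strings(headings):
--     # Stateless recomputation: each heading's number is derived directly from the
--     # sorted prefix of levels, with no running counter state.
--     order = sorted(headings)
--     levels = [headings[i] for i in order]
--     result = {}
--     for j in range(len(order)):
--         L = levels[j]
--         parts = []
--         for c in range(1, L + 1):
--             # window = maximal run of levels >= c ending at j (resets at any level < c)
--             k = j
--             while k >= 0 and levels[k] >= c:
--                 k -= 1
--             window = levels[k + 1:j + 1]
--             # component c = sibling count in the window, +1 if an ancestor opened it first
--             parts.append(window.count(c) + (1 if window[0] > c else 0))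
--         result[order[j]] = ".".join(str(p) for p in parts) + ("." if L == 1 else "")
--     return result
-- ===== Notes on version B (the rewrite author's own statement) =====
-- stated objective: alternative
-- what changed: Replaces A's stateful pass that mutates a fixed 10-slot counter array (parent-fill, increment, deeper-reset per heading) with a stateless per-heading recomputation: each number component is derived directly from the sorted level list by scanning backwards for the enclosing window (the maximal run of levels >= c) and counting siblings in it.
import Mathlib
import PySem

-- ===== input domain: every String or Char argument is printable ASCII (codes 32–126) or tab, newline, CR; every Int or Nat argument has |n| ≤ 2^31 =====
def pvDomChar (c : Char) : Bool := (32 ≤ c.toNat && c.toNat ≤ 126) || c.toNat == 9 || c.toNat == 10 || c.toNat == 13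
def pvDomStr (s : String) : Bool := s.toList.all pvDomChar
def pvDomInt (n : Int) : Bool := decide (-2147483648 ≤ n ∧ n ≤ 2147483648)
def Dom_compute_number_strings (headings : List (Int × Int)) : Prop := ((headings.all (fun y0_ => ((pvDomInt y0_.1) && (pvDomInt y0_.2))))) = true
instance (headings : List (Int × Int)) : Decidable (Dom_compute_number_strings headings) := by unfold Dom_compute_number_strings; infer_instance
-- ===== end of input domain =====

-- B drops A's running 10-slot counter state entirely: each heading's number is recomputed
-- independently from the sorted prefix of levels (a backward scan finds the enclosing window);
-- same return value on Pre_.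

-- ===== PORT A =====
-- one iteration of A's loop body on the 10-slot counter array
def stepA (counters : List Int) (level : Int) : List Int × String :=
  let c1 := (PySem.List.pyRange 0 (level - 1) 1).foldl
      (fun cs p => if PySem.List.pyGetD cs p 0 == 0 then PySem.List.pySetD cs p 1 else cs) counters
  let c2 := PySem.List.pySetD c1 (level - 1) (PySem.List.pyGetD c1 (level - 1) 0 + 1)
  let c3 := (PySem.List.pyRange level 10 1).foldl (fun cs d => PySem.List.pySetD cs d 0) c2
  let parts := (PySem.List.pyRange 0 level 1).map (fun i => PySem.Int.toStr (PySem.List.pyGetD c3 i 0))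
  (c3, PySem.Str.join "." parts ++ (if level == 1 then "." else ""))

def compute_number_strings (headings : List (Int × Int)) : List (Int × String) :=
  let d : PySem.Dict Int Int := PySem.Dict.mk headings
  let st := (PySem.List.sorted (PySem.Dict.keys d) (fun x => x) false).foldl
      (fun (st : List Int × PySem.Dict Int String) idx =>
        let level := PySem.Dict.getD d idx 0
        let r := stepA st.1 level
        (r.1, PySem.Dict.insert st.2 idx r.2))
      (List.replicate 10 0, PySem.Dict.mk [])
  st.2.items

-- ===== PORT B =====
-- while k >= 0 and levels[k] >= c: k -= 1   (k stays in range of levels while the guard holds)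
def scanBack (levels : List Int) (c : Int) (k : Int) : Int :=
  if h : 0 ≤ k ∧ c ≤ levels.getD k.toNat 0 then scanBack levels c (k - 1) else k
  termination_by (k + 1).toNat
  decreasing_by omega

def compute_number_strings_alt (headings : List (Int × Int)) : List (Int × String) :=
  let d : PySem.Dict Int Int := PySem.Dict.mk headings
  let order := PySem.List.sorted (PySem.Dict.keys d) (fun x => x) false
  let levels := order.map (fun i => PySem.Dict.getD d i 0)
  let result := (PySem.List.pyRange 0 ((order.length : Nat) : Int) 1).foldl
      (fun (r : PySem.Dict Int String) j =>
        let L := PySem.List.pyGetD levels j 0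
        let parts := (PySem.List.pyRange 1 (L + 1) 1).map (fun c =>
          let k := scanBack levels c j
          let window := PySem.List.slice levels (some (k + 1)) (some (j + 1))
          (PySem.List.count window c : Int) +
            (if c < PySem.List.pyGetD window 0 0 then 1 else 0))
        PySem.Dict.insert r (PySem.List.pyGetD order j 0)
          (PySem.Str.join "." (parts.map PySem.Int.toStr) ++ (if L == 1 then "." else "")))
      (PySem.Dict.mk [])
  result.items

-- ===== PRECONDITION & SPEC =====
-- Pre_ admits exactly the inputs A returns on: every heading level in -9..10; outside that range
-- A's fixed 10-slot array raises IndexError (B, which has no fixed array, returns a value there).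
def Pre_compute_number_strings (headings : List (Int × Int)) : Prop :=
  ∀ p ∈ headings, -9 ≤ p.2 ∧ p.2 ≤ 10
instance (headings : List (Int × Int)) : Decidable (Pre_compute_number_strings headings) := by
  unfold Pre_compute_number_strings; infer_instance

def pvWitness_compute_number_strings : (List (Int × Int)) := [(3, 1), (7, 2), (9, 0)]

def Spec_compute_number_strings (headings : List (Int × Int)) (out : List (Int × String)) : Prop := out = compute_number_strings_alt headings
instance (headings : List (Int × Int)) (out : List (Int × String)) : Decidable (Spec_compute_number_strings headings out) := by unfold Spec_compute_number_strings; infer_instance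

-- ===== CLAIM (what is proved, stated in full; the proofs are below) =====
def Claim_equal_compute_number_strings : Prop := ∀ (headings : List (Int × Int)), Dom_compute_number_strings headings → Pre_compute_number_strings headings → Spec_compute_number_strings headings (compute_number_strings headings)

-- ===== LEMMAS AND PROOFS =====

-- the window of levels that A's counter for depth c currently counts: the maximal suffix with
-- every level ≥ c (any level < c resets counter c)
def wnd (ps : List Int) (c : Int) : List Int := (ps.reverse.takeWhile (fun x => c ≤ x)).reverse

-- the value of A's counter for depth c after processing the level list ps
def val (ps : List Int) (c : Int) : Int :=
  ((wnd ps c).count c : Int) + (if c < (wnd ps c).headD c then 1 else 0)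

-- A's whole counter array after processing ps
def cArr (ps : List Int) : List Int := (List.range 10).map (fun i : Nat => val ps ((i : Int) + 1))

theorem wnd_append_le {ps : List Int} {L c : Int} (h : c ≤ L) :
    wnd (ps ++ [L]) c = wnd ps c ++ [L] := by
  simp [wnd, h]

theorem wnd_append_gt {ps : List Int} {L c : Int} (h : L < c) :
    wnd (ps ++ [L]) c = [] := by
  simp [wnd, not_le.2 h]

theorem wnd_mem_le {ps : List Int} {c x : Int} (hx : x ∈ wnd ps c) : c ≤ x := by
  have := List.mem_takeWhile_imp (l := ps.reverse) (p := fun x => decide (c ≤ x))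
    (by simpa [wnd] using List.mem_reverse.1 (by simpa [wnd] using hx))
  simpa using this

theorem val_pos_of_ne_nil {ps : List Int} {c : Int} (h : wnd ps c ≠ []) : 1 ≤ val ps c := by
  rcases hw : wnd ps c with _ | ⟨a, t⟩
  · exact absurd hw h
  · have ha : c ≤ a := wnd_mem_le (by rw [hw]; exact List.mem_cons_self ..)
    have hnn : (0:Int) ≤ ((a :: t).count c : Int) := by positivity
    unfold val
    rw [hw]
    simp only [List.headD_cons]
    rcases lt_or_eq_of_le ha with hlt | heq
    · rw [if_pos hlt]; omega
    · have h1 : 1 ≤ ((a :: t).count c : Int) := by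
        exact_mod_cast List.count_pos_iff.2 (by rw [heq]; exact List.mem_cons_self ..)
      split <;> omega

theorem val_nil_zero {ps : List Int} {c : Int} (h : wnd ps c = []) : val ps c = 0 := by
  simp [val, h]

theorem val_append_gt {ps : List Int} {L c : Int} (h : L < c) : val (ps ++ [L]) c = 0 :=
  val_nil_zero (wnd_append_gt h)

theorem val_append_self (ps : List Int) (L : Int) : val (ps ++ [L]) L = val ps L + 1 := by
  rcases hw : wnd ps L with _ | ⟨a, t⟩
  · unfold val
    rw [wnd_append_le (le_refl L), hw]
    simp
  · unfold val
    rw [wnd_append_le (le_refl L), hw]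
    have hcnt : ((a :: t) ++ [L]).count L = (a :: t).count L + 1 := by
      simp [List.count_cons, List.count_append]
      split <;> omega
    rw [hcnt]
    simp only [List.cons_append, List.headD_cons]
    split <;> omega

theorem val_append_lt {ps : List Int} {L c : Int} (h : c < L) :
    val (ps ++ [L]) c = if val ps c = 0 then 1 else val ps c := by
  have hLc : (L == c) = false := by simp; omega
  rcases hw : wnd ps c with _ | ⟨a, t⟩
  · rw [val_nil_zero hw, if_pos rfl]
    unfold val
    rw [wnd_append_le (le_of_lt h), hw]
    simp [List.count_singleton, hLc, h]
  · have hpos : 1 ≤ val ps c := val_pos_of_ne_nil (by rw [hw]; simp)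
    rw [if_neg (by omega)]
    unfold val
    rw [wnd_append_le (le_of_lt h), hw]
    have hcnt : ((a :: t) ++ [L]).count c = (a :: t).count c := by
      simp [List.count_cons, List.count_append, hLc]
    rw [hcnt]
    rfl

theorem cArr_length (ps : List Int) : (cArr ps).length = 10 := by simp [cArr]

theorem cArr_getD (ps : List Int) (i : Nat) (hi : i < 10) :
    (cArr ps).getD i 0 = val ps ((i : Int) + 1) := by
  unfold cArr
  rw [PySem.List.getD_map_range _ _ _ _ hi]

-- ===== loop characterisations for A's three inner loops =====

theorem fill_len (m : Int) (c : List Int) :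
    ((PySem.List.pyRange 0 m 1).foldl
      (fun cs p => if PySem.List.pyGetD cs p 0 == 0 then PySem.List.pySetD cs p 1 else cs) c).length
    = c.length := by
  induction (PySem.List.pyRange 0 m 1) generalizing c with
  | nil => rfl
  | cons x t ih =>
    simp only [List.foldl_cons]
    split
    · rw [ih]; simp [PySem.List.length_pySetD]
    · rw [ih]

theorem fill_loop (m : Nat) (c : List Int) (hc : c.length = 10) (hm : m ≤ 10) :
    ∀ i : Nat, i < 10 →
    ((PySem.List.pyRange 0 (m : Int) 1).foldl
      (fun cs p => if PySem.List.pyGetD cs p 0 == 0 then PySem.List.pySetD cs p 1 else cs) c).getD i 0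
    = if i < m ∧ c.getD i 0 = 0 then 1 else c.getD i 0 := by
  induction m with
  | zero =>
    intro i hi
    simp [PySem.List.pyRange_one_eq_nil]
  | succ m ih =>
    intro i hi
    have hcast : ((m + 1 : Nat) : Int) = (m : Int) + 1 := by push_cast; ring
    rw [hcast, PySem.List.pyRange_one_succ_right (by positivity), List.foldl_append]
    set q := (PySem.List.pyRange 0 (m : Int) 1).foldl
      (fun cs p => if PySem.List.pyGetD cs p 0 == 0 then PySem.List.pySetD cs p 1 else cs) c with hq
    have hql : q.length = 10 := by rw [hq, fill_len, hc]
    have hqi : ∀ i : Nat, i < 10 → q.getD i 0 = if i < m ∧ c.getD i 0 = 0 then 1 else c.getD i 0 :=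
      ih (by omega)
    simp only [List.foldl_cons, List.foldl_nil, PySem.List.pyGetD_natCast, PySem.List.pySetD_natCast]
    by_cases h0 : q.getD m 0 = 0
    · rw [if_pos (by simpa using h0)]
      rcases eq_or_ne i m with rfl | hne
      · rw [List.getD_eq_getElem?_getD, List.getElem?_set_self (by omega), Option.getD_some]
        have hx := hqi i hi
        rw [h0] at hx
        have hc0 : c.getD i 0 = 0 := by
          rw [if_neg (fun hcon => absurd hcon.1 (lt_irrefl i))] at hx
          omega
        rw [if_pos ⟨by omega, hc0⟩]
      · rw [List.getD_eq_getElem?_getD, List.getElem?_set_ne (by omega),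
          ← List.getD_eq_getElem?_getD, hqi i hi]
        have hiff : (i < m ∧ c.getD i 0 = 0) ↔ (i < m + 1 ∧ c.getD i 0 = 0) :=
          ⟨fun ⟨h1, h2⟩ => ⟨by omega, h2⟩, fun ⟨h1, h2⟩ => ⟨by omega, h2⟩⟩
        simp only [hiff]
    · rw [if_neg (by simpa using h0), hqi i hi]
      rcases eq_or_ne i m with rfl | hne
      · have hx := hqi i hi
        have hcnz : c.getD i 0 ≠ 0 := by
          intro hc0
          apply h0
          rw [hx, if_neg (fun hcon => absurd hcon.1 (lt_irrefl i))]
          exact hc0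
        rw [if_neg (fun hcon => absurd hcon.1 (lt_irrefl i)), if_neg (fun hcon => hcnz hcon.2)]
      · have hiff : (i < m ∧ c.getD i 0 = 0) ↔ (i < m + 1 ∧ c.getD i 0 = 0) :=
          ⟨fun ⟨h1, h2⟩ => ⟨by omega, h2⟩, fun ⟨h1, h2⟩ => ⟨by omega, h2⟩⟩
        simp only [hiff]

theorem reset_len (l : List Int) (c : List Int) :
    (l.foldl (fun cs d => PySem.List.pySetD cs d 0) c).length = c.length := by
  induction l generalizing c with
  | nil => rfl
  | cons x t ih => simp [ih, PySem.List.length_pySetD]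

theorem reset_aux (j : Nat) (c : List Int) (hc : c.length = 10) (hj : j ≤ 10) :
    (PySem.List.pyRange ((10 - j : Nat) : Int) 10 1).foldl (fun cs d => PySem.List.pySetD cs d 0) c
    = c.take (10 - j) ++ List.replicate j 0 := by
  induction j generalizing c with
  | zero => simp [PySem.List.pyRange_one_eq_nil, List.take_of_length_le (le_of_eq hc)]
  | succ j ih =>
    rw [PySem.List.pyRange_one_cons (by push_cast; omega : ((10 - (j+1) : Nat) : Int) < 10)]
    rw [List.foldl_cons, PySem.List.pySetD_natCast]
    have hcast : ((10 - (j+1) : Nat) : Int) + 1 = ((10 - j : Nat) : Int) := by push_cast; omega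
    rw [hcast, ih (c.set (10 - (j+1)) 0) (by simp [hc]) (by omega)]
    have hlt : 10 - (j+1) < c.length := by omega
    rw [List.set_eq_take_cons_drop 0 hlt]
    have h1 : (10 : Nat) - j = (c.take (10 - (j+1))).length + 1 := by
      simp [hc]; omega
    rw [h1, List.take_append]
    simp [List.replicate_succ]

theorem reset_loop_eq (m : Nat) (c : List Int) (hm : m ≤ 10) (hc : c.length = 10) :
    (PySem.List.pyRange (m : Int) 10 1).foldl (fun cs d => PySem.List.pySetD cs d 0) c
    = c.take m ++ List.replicate (10 - m) 0 := by
  have h := reset_aux (10 - m) c hc (by omega)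
  have h2 : (10 : Nat) - (10 - m) = m := by omega
  rw [h2] at h
  exact h

theorem reset_loop_neg (L : Int) (c : List Int) (hL : L ≤ 0) (hc : c.length = 10) :
    (PySem.List.pyRange L 10 1).foldl (fun cs d => PySem.List.pySetD cs d 0) c
    = List.replicate 10 0 := by
  rw [PySem.List.pyRange_one_append L 0 10 (by omega) (by omega), List.foldl_append]
  have h0 := reset_loop_eq 0
      ((PySem.List.pyRange L 0 1).foldl (fun cs d => PySem.List.pySetD cs d 0) c)
      (by omega) (by rw [reset_len, hc])
  simpa using h0

-- ===== A's step sends cArr ps to cArr (ps ++ [L]) and emits the number string of ps ++ [L] =====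

def strOf (ps' : List Int) (L : Int) : String :=
  PySem.Str.join "."
    (((PySem.List.pyRange 1 (L + 1) 1).map (fun c => val ps' c)).map PySem.Int.toStr)
    ++ (if L == 1 then "." else "")

theorem pyRange_one_shift (n : Nat) :
    PySem.List.pyRange 1 ((n : Int) + 1) 1 = (List.range n).map (fun i : Nat => (i : Int) + 1) := by
  induction n with
  | zero => simp [PySem.List.pyRange_one_eq_nil]
  | succ n ih =>
    have hcast : ((n + 1 : Nat) : Int) + 1 = ((n : Int) + 1) + 1 := by push_cast; ring
    rw [hcast, PySem.List.pyRange_one_succ_right (by omega), ih, List.range_succ]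
    simp

theorem stepA_eq (ps : List Int) (L : Int) (hlo : -9 ≤ L) (hhi : L ≤ 10) :
    stepA (cArr ps) L = (cArr (ps ++ [L]), strOf (ps ++ [L]) L) := by
  rcases lt_or_ge L 1 with hneg | hpos
  · have h1 : (L == 1) = false := by rw [beq_eq_false_iff_ne]; omega
    have hC : List.replicate 10 0 = cArr (ps ++ [L]) := by
      apply List.ext_getElem (by simp [cArr])
      intro i h1' h2'
      have h10 : i < 10 := by simpa using h1'
      simp only [cArr, List.getElem_map, List.getElem_range, List.getElem_replicate]
      exact (val_append_gt (by omega)).symm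
    simp only [stepA]
    rw [PySem.List.pyRange_one_eq_nil (show L - 1 ≤ 0 by omega)]
    simp only [List.foldl_nil]
    rw [reset_loop_neg L _ (by omega) (by rw [PySem.List.length_pySetD, cArr_length])]
    rw [PySem.List.pyRange_one_eq_nil (show L ≤ 0 by omega), hC]
    simp [strOf, PySem.List.pyRange_one_eq_nil (show L + 1 ≤ 1 by omega), h1]
  · obtain ⟨n, hn1, hn10, rfl⟩ : ∃ n : Nat, 1 ≤ n ∧ n ≤ 10 ∧ L = (n : Int) :=
      ⟨L.toNat, by omega, by omega, by omega⟩
    have hL1 : (n : Int) - 1 = ((n - 1 : Nat) : Int) := by omega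
    simp only [stepA]
    rw [hL1]
    simp only [PySem.List.pyGetD_natCast, PySem.List.pySetD_natCast]
    set c1 := (PySem.List.pyRange 0 ((n - 1 : Nat) : Int) 1).foldl
      (fun cs p => if PySem.List.pyGetD cs p 0 == 0 then PySem.List.pySetD cs p 1 else cs)
      (cArr ps) with hc1
    have hlen1 : c1.length = 10 := by rw [hc1, fill_len, cArr_length]
    have hval1 : ∀ i : Nat, i < 10 → c1.getD i 0
        = if i < n - 1 ∧ val ps ((i : Int) + 1) = 0 then 1 else val ps ((i : Int) + 1) := by
      intro i hi
      rw [hc1, fill_loop (n - 1) (cArr ps) (cArr_length ps) (by omega) i hi, cArr_getD ps i hi]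
    set c2 := c1.set (n - 1) (c1.getD (n - 1) 0 + 1) with hc2
    have hlen2 : c2.length = 10 := by simp [hc2, hlen1]
    have hval2 : ∀ i : Nat, i < 10 →
        c2.getD i 0 = if i = n - 1 then c1.getD i 0 + 1 else c1.getD i 0 := by
      intro i hi
      rcases eq_or_ne i (n - 1) with rfl | hne
      · rw [hc2, if_pos rfl, List.getD_eq_getElem?_getD, List.getElem?_set_self (by omega),
          Option.getD_some]
      · rw [hc2, if_neg hne, List.getD_eq_getElem?_getD, List.getElem?_set_ne (by omega),
          ← List.getD_eq_getElem?_getD]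
    rw [reset_loop_eq n c2 (by omega) hlen2]
    set c3 := c2.take n ++ List.replicate (10 - n) 0 with hc3
    have hval3 : ∀ i : Nat, i < 10 → c3.getD i 0 = if i < n then c2.getD i 0 else 0 := by
      intro i hi
      rcases lt_or_ge i n with hin | hin
      · rw [if_pos hin, hc3, List.getD_eq_getElem?_getD,
          List.getElem?_append_left (by simp [hlen2]; omega), List.getElem?_take, if_pos hin,
          ← List.getD_eq_getElem?_getD]
      · rw [if_neg (by omega), hc3, List.getD_eq_getElem?_getD,
          List.getElem?_append_right (by simp [hlen2]; omega)]
        simp [hlen2]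
    have hC : c3 = cArr (ps ++ [(n : Int)]) := by
      apply List.ext_getElem (by simp [hc3, hlen2, cArr]; omega)
      intro i hp hq
      have hi : i < 10 := by simpa [cArr] using hq
      have hgd : ∀ (l : List Int) (hl : i < l.length), l[i] = l.getD i 0 := by
        intro l hl
        rw [List.getD_eq_getElem?_getD, List.getElem?_eq_getElem hl]
        rfl
      rw [hgd _ hp, hgd _ hq, hval3 i hi, cArr_getD _ i hi]
      rcases lt_or_ge i n with hin | hin
      · rw [if_pos hin, hval2 i hi, hval1 i hi]
        rcases eq_or_ne i (n - 1) with heq | hne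
        · rw [if_pos heq, if_neg (fun hcon => absurd hcon.1 (by omega))]
          rw [show ((i : Int) + 1) = (n : Int) by omega, val_append_self]
        · have hlt : (i : Int) + 1 < (n : Int) := by omega
          rw [if_neg hne, val_append_lt hlt]
          have hin1 : i < n - 1 := by omega
          by_cases hz : val ps ((i : Int) + 1) = 0
          · rw [if_pos ⟨hin1, hz⟩, if_pos hz]
          · rw [if_neg (fun hcon => hz hcon.2), if_neg hz]
      · rw [if_neg (by omega), val_append_gt (by omega)]
    rw [hC]
    refine congrArg (Prod.mk _) ?_
    have hA : (PySem.List.pyRange 0 ((n : Nat) : Int) 1).map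
        (fun i => PySem.Int.toStr (PySem.List.pyGetD (cArr (ps ++ [(n : Int)])) i 0))
        = (List.range n).map (fun k : Nat => PySem.Int.toStr (val (ps ++ [(n : Int)]) ((k : Int) + 1))) := by
      rw [PySem.List.pyRange_zero_natCast, List.map_map]
      apply List.map_congr_left
      intro k hk
      have hk10 : k < 10 := by have := List.mem_range.1 hk; omega
      simp only [Function.comp, PySem.List.pyGetD_natCast, cArr_getD _ k hk10]
    have hB : ((PySem.List.pyRange 1 ((n : Int) + 1) 1).map
          (fun c => val (ps ++ [(n : Int)]) c)).map PySem.Int.toStr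
        = (List.range n).map (fun k : Nat => PySem.Int.toStr (val (ps ++ [(n : Int)]) ((k : Int) + 1))) := by
      rw [pyRange_one_shift, List.map_map, List.map_map]
      rfl
    rw [strOf, hB, hA]

-- ===== B's inner computation equals val on the processed prefix =====

theorem scanBack_le (levels : List Int) (c : Int) (k : Int) : scanBack levels c k ≤ k := by
  fun_induction scanBack with
  | case1 k h ih => omega
  | case2 k h => omega

theorem scanBack_neg_one_le (levels : List Int) (c : Int) (k : Int) (hk : -1 ≤ k) :
    -1 ≤ scanBack levels c k := by
  fun_induction scanBack with
  | case1 k h ih => exact ih (by omega)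
  | case2 k h => omega

theorem scan_slice (levels : List Int) (c : Int) :
    ∀ j : Nat, j ≤ levels.length →
    PySem.List.slice levels (some (scanBack levels c ((j : Int) - 1) + 1)) (some (j : Int))
    = wnd (levels.take j) c := by
  intro j
  induction j with
  | zero =>
    intro _
    have h1 : scanBack levels c (((0 : Nat) : Int) - 1) = -1 := by
      rw [scanBack, dif_neg (by omega)]
      omega
    rw [h1, show (-1 : Int) + 1 = ((0 : Nat) : Int) by norm_num,
      PySem.List.slice_natCast]
    simp [wnd]
  | succ j ih =>
    intro hj
    have hjl : j < levels.length := by omega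
    have hcast : ((j + 1 : Nat) : Int) - 1 = (j : Int) := by push_cast; ring
    rw [hcast]
    have htake : levels.take (j + 1) = levels.take j ++ [levels[j]] := by
      rw [List.take_add_one, List.getElem?_eq_getElem hjl]
      rfl
    have hgd : levels.getD ((j : Int)).toNat 0 = levels[j] := by
      simp [List.getD_eq_getElem?_getD, List.getElem?_eq_getElem hjl]
    rw [scanBack]
    by_cases hcc : c ≤ levels.getD ((j : Int)).toNat 0
    · rw [dif_pos ⟨by positivity, hcc⟩]
      rw [hgd] at hcc
      set k := scanBack levels c ((j : Int) - 1) with hk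
      have hk1 : k ≤ (j : Int) - 1 := scanBack_le ..
      have hk2 : -1 ≤ k := scanBack_neg_one_le _ _ _ (by omega)
      obtain ⟨a, ha1, ha2⟩ : ∃ a : Nat, k + 1 = (a : Int) ∧ a ≤ j := ⟨(k+1).toNat, by omega, by omega⟩
      rw [htake, wnd_append_le hcc, ← ih (by omega), ha1]
      have hL : PySem.List.slice levels (some ((a : Nat) : Int)) (some (((j + 1) : Nat) : Int))
          = (levels.drop a).take ((j + 1) - a) := PySem.List.slice_natCast ..
      rw [hL, PySem.List.slice_natCast, show j + 1 - a = (j - a) + 1 by omega,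
        List.take_add_one, List.getElem?_drop, show a + (j - a) = j by omega,
        List.getElem?_eq_getElem hjl]
      rfl
    · rw [dif_neg (fun hand => hcc hand.2)]
      rw [hgd] at hcc
      rw [htake, wnd_append_gt (by omega)]
      rw [show ((j : Int) + 1) = (((j + 1) : Nat) : Int) by push_cast; ring,
        PySem.List.slice_natCast]
      simp

-- ===== the two folds agree =====

theorem fold_agree (d : PySem.Dict Int Int) (order levels : List Int)
    (hlv : levels = order.map (fun i => PySem.Dict.getD d i 0))
    (hbnd : ∀ x ∈ levels, -9 ≤ x ∧ x ≤ 10) :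
    ∀ (n t : Nat), order.length - t = n → t ≤ order.length →
    ∀ (r : PySem.Dict Int String),
    ((order.drop t).foldl
      (fun (st : List Int × PySem.Dict Int String) idx =>
        let level := PySem.Dict.getD d idx 0
        let q := stepA st.1 level
        (q.1, PySem.Dict.insert st.2 idx q.2)) (cArr (levels.take t), r)).2
    = (PySem.List.pyRange (t : Int) ((order.length : Nat) : Int) 1).foldl
      (fun (r : PySem.Dict Int String) j =>
        let L := PySem.List.pyGetD levels j 0
        let parts := (PySem.List.pyRange 1 (L + 1) 1).map (fun c =>
          let k := scanBack levels c j
          let window := PySem.List.slice levels (some (k + 1)) (some (j + 1))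
          (PySem.List.count window c : Int) +
            (if c < PySem.List.pyGetD window 0 0 then 1 else 0))
        PySem.Dict.insert r (PySem.List.pyGetD order j 0)
          (PySem.Str.join "." (parts.map PySem.Int.toStr) ++ (if L == 1 then "." else "")))
      r := by
  intro n
  induction n with
  | zero =>
    intro t hnt ht r
    have htl : t = order.length := by omega
    subst htl
    rw [List.drop_length, PySem.List.pyRange_one_eq_nil (by omega)]
    rfl
  | succ m ih =>
    intro t hnt ht r
    have htl : t < order.length := by omega
    have hlevlen : levels.length = order.length := by rw [hlv]; simp
    have htlv : t < levels.length := by omega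
    set L := levels[t]'htlv with hLdef
    have hbt : -9 ≤ L ∧ L ≤ 10 := hbnd L (List.getElem_mem htlv)
    have hlevt : PySem.Dict.getD d (order[t]'htl) 0 = L := by
      have h1 : levels[t]? = some (PySem.Dict.getD d (order[t]'htl) 0) := by
        rw [hlv, List.getElem?_map, List.getElem?_eq_getElem htl]
        rfl
      exact ((List.getElem_eq_iff htlv).2 h1).symm
    have htk : levels.take t ++ [L] = levels.take (t + 1) := by
      rw [List.take_add_one, List.getElem?_eq_getElem htlv]
      rfl
    have hgetlev : PySem.List.pyGetD levels ((t : Nat) : Int) 0 = L := by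
      rw [PySem.List.pyGetD_natCast, List.getD_eq_getElem?_getD, List.getElem?_eq_getElem htlv]
      rfl
    have hgetord : PySem.List.pyGetD order ((t : Nat) : Int) 0 = order[t]'htl := by
      rw [PySem.List.pyGetD_natCast, List.getD_eq_getElem?_getD, List.getElem?_eq_getElem htl]
      rfl
    have hparts : ∀ c ∈ PySem.List.pyRange 1 (L + 1) 1,
        ((PySem.List.count (PySem.List.slice levels
            (some (scanBack levels c ((t : Nat) : Int) + 1)) (some (((t : Nat) : Int) + 1))) c : Int)
          + (if c < PySem.List.pyGetD (PySem.List.slice levels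
              (some (scanBack levels c ((t : Nat) : Int) + 1)) (some (((t : Nat) : Int) + 1))) 0 0
             then 1 else 0))
        = val (levels.take (t + 1)) c := by
      intro c hc
      obtain ⟨hc1, hc2⟩ := PySem.List.mem_pyRange_one.1 hc
      have hcL : c ≤ L := by omega
      have hcast1 : ((t : Nat) : Int) = (((t + 1 : Nat) : Int)) - 1 := by push_cast; ring
      have hcast2 : (((t : Nat) : Int)) + 1 = ((t + 1 : Nat) : Int) := by push_cast; ring
      rw [hcast2, hcast1, scan_slice levels c (t + 1) (by omega)]
      have hw : wnd (levels.take (t + 1)) c = wnd (levels.take t) c ++ [L] := by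
        rw [← htk, wnd_append_le hcL]
      obtain ⟨a, tl, hw2⟩ : ∃ a tl, wnd (levels.take (t + 1)) c = a :: tl := by
        rw [hw]
        rcases wnd (levels.take t) c with _ | ⟨a, u⟩
        · exact ⟨L, [], rfl⟩
        · exact ⟨a, u ++ [L], rfl⟩
      rw [hw2]
      unfold val
      rw [hw2, PySem.List.count_eq,
        show PySem.List.pyGetD (a :: tl) 0 0 = a by
          rw [show (0 : Int) = ((0 : Nat) : Int) from rfl, PySem.List.pyGetD_natCast]
          rfl,
        List.headD_cons]
    rw [List.drop_eq_getElem_cons htl,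
      PySem.List.pyRange_one_cons (by exact_mod_cast htl)]
    simp only [List.foldl_cons]
    rw [hlevt, hgetlev, hgetord, stepA_eq _ _ hbt.1 hbt.2, htk,
      List.map_congr_left hparts]
    have hstr : PySem.Str.join "."
          (((PySem.List.pyRange 1 (L + 1) 1).map (fun c => val (levels.take (t + 1)) c)).map
            PySem.Int.toStr) ++ (if L == 1 then "." else "")
        = strOf (levels.take (t + 1)) L := rfl
    rw [hstr, show (((t : Nat) : Int)) + 1 = ((t + 1 : Nat) : Int) by push_cast; ring]
    exact ih (t + 1) (by omega) (by omega) _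

theorem getD_bounds (headings : List (Int × Int))
    (hpre : Pre_compute_number_strings headings) :
    ∀ idx ∈ PySem.List.sorted (PySem.Dict.keys (PySem.Dict.mk headings)) (fun x => x) false,
      -9 ≤ PySem.Dict.getD (PySem.Dict.mk headings) idx 0 ∧
        PySem.Dict.getD (PySem.Dict.mk headings) idx 0 ≤ 10 := by
  intro idx hidx
  rw [PySem.List.mem_sorted] at hidx
  rcases hv : PySem.Dict.get? (PySem.Dict.mk headings) idx with _ | v
  · exact absurd hidx ((PySem.Dict.get?_eq_none_iff_not_mem_keys _ _).1 hv)
  · have hmem := PySem.Dict.mem_items_of_get?_eq_some _ hv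
    have := hpre _ hmem
    rw [PySem.Dict.getD_eq_get?_getD, hv]
    exact this

-- ===== VERDICT (by name: the statement is the Claim_ definition above) =====
theorem compute_number_strings_spec : Claim_equal_compute_number_strings := by
  intro headings _ hpre
  unfold Spec_compute_number_strings compute_number_strings compute_number_strings_alt
  dsimp only
  set d := PySem.Dict.mk headings with hd
  set order := PySem.List.sorted (PySem.Dict.keys d) (fun x => x) false with horder
  set levels := order.map (fun i => PySem.Dict.getD d i 0) with hlv
  have hbnd : ∀ x ∈ levels, -9 ≤ x ∧ x ≤ 10 := by
    intro x hx
    rw [hlv, List.mem_map] at hx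
    obtain ⟨i, hi, rfl⟩ := hx
    exact getD_bounds headings hpre i hi
  have h := fold_agree d order levels hlv hbnd (order.length) 0 (by omega) (by omega)
      (PySem.Dict.mk [])
  simp only [List.drop_zero, List.take_zero, Nat.cast_zero] at h
  have hinit : cArr [] = List.replicate 10 0 := by decide
  rw [hinit] at h
  rw [h]
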